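-- pv_equiv track=rewrite | github.com/gallofb/Python_linux | py_test/2019春招/头条/整数中1出现的次数.py | count
-- ===== SOURCE A (Python) =====
-- def count(n):
--     count = 0
--     i = 1
--     while i<=n:
--         a = n // i
--         b = n % i
--         if a%10 == 0:
--             count+=a//10*i
--         elif a%10 == 1:
--             count+=(a//10*i)+(b+1)
--         else:
--             count+=(a//10+1)*i
--         i *=10
--
--     return count
-- ===== SOURCE B (Python) =====
-- def count(n):
--     # Recursive digit decomposition: split n as n = 10*m + d and recurse on m - 1.
--     if n <= 0:
--         return 0
--     m, d = divmod(n, 10)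
--     total = m + (1 if d >= 1 else 0)      # ones contributed by the units place of 1..n
--     total += 10 * count(m - 1)            # ones in higher places of full blocks 10k..10k+9
--     total += (d + 1) * ones(m)            # ones in higher places of the partial block 10m..n
--     return total
--
-- def ones(m):
--     c = 0
--     while m > 0:
--         if m % 10 == 1:
--             c += 1
--         m //= 10
--     return c
-- ===== Notes on version B (the rewrite author's own statement) =====
-- stated objective: alternative
-- what changed: Replaces A's iterative per-decimal-place closed-formula loop over growing powers of ten with a recursive last-digit decomposition: B splits off the final digit, counts units-place ones directly, recurses on the reduced quotient for the higher places of full ten-blocks, and adds the partial block via a digit-one counter.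
import Mathlib
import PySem

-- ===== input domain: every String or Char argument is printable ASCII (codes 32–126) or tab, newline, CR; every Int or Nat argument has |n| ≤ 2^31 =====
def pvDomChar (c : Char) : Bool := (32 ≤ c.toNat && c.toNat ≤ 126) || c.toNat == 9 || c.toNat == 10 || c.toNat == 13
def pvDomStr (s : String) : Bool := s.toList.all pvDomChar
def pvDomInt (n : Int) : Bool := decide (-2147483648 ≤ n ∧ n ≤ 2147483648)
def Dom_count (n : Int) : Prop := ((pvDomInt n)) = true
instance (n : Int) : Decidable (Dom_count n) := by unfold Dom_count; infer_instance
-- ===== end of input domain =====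

-- B replaces A's per-decimal-place closed formula with a recursive last-digit decomposition
-- (n = 10*m + d, recursing on m - 1); equal return values are proved for every Int n.

-- ===== PORT A =====
-- A's while loop: i runs over 1, 10, 100, … while i ≤ n, accumulating `count`.
-- The extra `1 ≤ i` in the guard is a totality guard only: the loop is entered with i = 1
-- and i only ever multiplies by 10, so it never fires differently from Python's `i <= n`.
def countLoop (n i cnt : Int) : Int :=
  if h : 1 ≤ i ∧ i ≤ n then
    let a := PySem.Int.floordiv n i
    let b := PySem.Int.mod n i
    let cnt' :=
      if PySem.Int.mod a 10 = 0 then cnt + PySem.Int.floordiv a 10 * i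
      else if PySem.Int.mod a 10 = 1 then cnt + (PySem.Int.floordiv a 10 * i + (b + 1))
      else cnt + (PySem.Int.floordiv a 10 + 1) * i
    countLoop n (i * 10) cnt'
  else cnt
termination_by (n + 1 - i).toNat
decreasing_by
  have h1 : 0 < n + 1 - i := by omega
  omega

def count (n : Int) : Int := countLoop n 1 0

-- ===== PORT B =====
-- B's helper `ones`: while m > 0 count 1-digits, accumulator c.
def onesLoop (m c : Int) : Int :=
  if h : 0 < m then
    onesLoop (PySem.Int.floordiv m 10) (c + if PySem.Int.mod m 10 = 1 then 1 else 0)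
  else c
termination_by m.toNat
decreasing_by
  rw [PySem.Int.floordiv_eq_ediv_of_pos (by omega : (0:Int) < 10)]
  have : m / 10 < m := by omega
  omega

def count_alt (n : Int) : Int :=
  if hn : n ≤ 0 then 0
  else
    let m := PySem.Int.floordiv n 10
    let d := PySem.Int.mod n 10
    m + (if 1 ≤ d then 1 else 0) + 10 * count_alt (m - 1) + (d + 1) * onesLoop m 0
termination_by n.toNat
decreasing_by
  rw [PySem.Int.floordiv_eq_ediv_of_pos (by omega : (0:Int) < 10)]
  have : n / 10 < n := by omega
  omega

-- ===== PRECONDITION & SPEC =====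
def Spec_count (n : Int) (out : Int) : Prop := out = count_alt n
instance (n : Int) (out : Int) : Decidable (Spec_count n out) := by unfold Spec_count; infer_instance

-- ===== CLAIM (what is proved, stated in full; the proofs are below) =====
def Claim_equal_count : Prop := ∀ (n : Int), Dom_count n → Spec_count n (count n)

-- ===== LEMMAS AND PROOFS =====

-- Pure (accumulator-free) spec of B's digit-one counter.
def onesS (m : Int) : Int :=
  if h : 0 < m then (if m % 10 = 1 then 1 else 0) + onesS (m / 10) else 0
termination_by m.toNat
decreasing_by
  have : m / 10 < m := by omega
  omega

-- Pure spec of one iteration of A's loop (the contribution of decimal place i).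
def term (n i : Int) : Int :=
  if n / i % 10 = 0 then n / i / 10 * i
  else if n / i % 10 = 1 then n / i / 10 * i + (n % i + 1)
  else (n / i / 10 + 1) * i

-- Accumulator-free spec of A's loop.
def G (n i : Int) : Int :=
  if h : 1 ≤ i ∧ i ≤ n then term n i + G n (i * 10) else 0
termination_by (n + 1 - i).toNat
decreasing_by
  have h1 : 0 < n + 1 - i := by omega
  omega

-- Running total of onesS over 1..k.
def Sn : Nat → Int
  | 0 => 0
  | k + 1 => Sn k + onesS ((k : Int) + 1)

def S (n : Int) : Int := Sn n.toNat

lemma onesS_nonpos {m : Int} (h : m ≤ 0) : onesS m = 0 := by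
  rw [onesS]; simp [show ¬ 0 < m by omega]

lemma onesS_pos {m : Int} (h : 0 < m) :
    onesS m = (if m % 10 = 1 then 1 else 0) + onesS (m / 10) := by
  rw [onesS]; simp [h]

lemma onesLoop_eq (m c : Int) : onesLoop m c = c + onesS m := by
  by_cases h : 0 < m
  · rw [onesLoop, onesS]
    simp only [h, dif_pos]
    rw [PySem.Int.floordiv_eq_ediv_of_pos (by omega : (0:Int) < 10),
        PySem.Int.mod_eq_emod_of_pos (by omega : (0:Int) < 10)]
    rw [onesLoop_eq (m / 10)]
    ring
  · rw [onesLoop, onesS]; simp [h]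
termination_by m.toNat
decreasing_by
  have : m / 10 < m := by omega
  omega

lemma countLoop_eq (n i cnt : Int) : countLoop n i cnt = cnt + G n i := by
  by_cases h : 1 ≤ i ∧ i ≤ n
  · rw [countLoop, G]
    simp only [h, dif_pos]
    have h10 : (0:Int) < 10 := by omega
    have hi : (0:Int) < i := by omega
    rw [PySem.Int.floordiv_eq_ediv_of_pos hi, PySem.Int.mod_eq_emod_of_pos hi,
        PySem.Int.floordiv_eq_ediv_of_pos h10, PySem.Int.mod_eq_emod_of_pos h10]
    rw [countLoop_eq n (i * 10)]
    unfold term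
    split_ifs <;> ring
  · rw [countLoop, G]; simp [h]
termination_by (n + 1 - i).toNat
decreasing_by
  have h1 : 0 < n + 1 - i := by omega
  omega

-- term n i as a function of the quotient and remainder of n by i.
def termAB (a b i : Int) : Int :=
  if a % 10 = 0 then a / 10 * i
  else if a % 10 = 1 then a / 10 * i + (b + 1)
  else (a / 10 + 1) * i

lemma term_eq (n i : Int) : term n i = termAB (n / i) (n % i) i := rfl

lemma termAB_diff1 (a b i : Int) :
    termAB a b i = termAB a (b - 1) i + (if a % 10 = 1 then 1 else 0) := by
  unfold termAB
  split_ifs with h1 h2 h3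
  · exfalso; omega
  · ring
  · ring
  · ring

lemma termAB_diff0 (a i : Int) (ha : 1 ≤ a) :
    termAB a 0 i = termAB (a - 1) (i - 1) i + (if a % 10 = 1 then 1 else 0) := by
  unfold termAB
  rcases (show a % 10 = 0 ∨ a % 10 = 1 ∨ a % 10 = 2 ∨ 3 ≤ a % 10 by omega) with h0 | h1 | h2 | h3
  · rw [h0, show (a - 1) % 10 = 9 by omega, show (a - 1) / 10 = a / 10 - 1 by omega]
    norm_num
    try ring
  · rw [h1, show (a - 1) % 10 = 0 by omega, show (a - 1) / 10 = a / 10 by omega]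
    norm_num
    try ring
  · rw [h2, show (a - 1) % 10 = 1 by omega, show (a - 1) / 10 = a / 10 by omega]
    norm_num
    try ring
  · rw [if_neg (show ¬ a % 10 = 0 by omega), if_neg (show ¬ a % 10 = 1 by omega),
        if_neg (show ¬ (a - 1) % 10 = 0 by omega), if_neg (show ¬ (a - 1) % 10 = 1 by omega),
        show (a - 1) / 10 = a / 10 by omega, if_neg (show ¬ a % 10 = 1 by omega)]
    ring

-- The contribution of place i to n minus that to n - 1 is the indicator that
-- n's digit at place i equals 1 — the heart of the equivalence.
lemma term_diff {n i : Int} (hi : 1 ≤ i) (hin : i ≤ n - 1) :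
    term n i = term (n - 1) i + (if n / i % 10 = 1 then 1 else 0) := by
  have hi0 : (0:Int) < i := by omega
  have hab : i * (n / i) + n % i = n := Int.ediv_add_emod n i
  have hb0 : 0 ≤ n % i := Int.emod_nonneg n (by omega)
  have hbi : n % i < i := Int.emod_lt_of_pos n hi0
  rw [term_eq, term_eq]
  by_cases hbpos : 1 ≤ n % i
  · -- same quotient, remainder drops by one
    have hq : (n - 1) / i = n / i := by
      have h2 : n - 1 = (n % i - 1) + (n / i) * i := by linarith [hab]
      rw [h2, Int.add_mul_ediv_right _ _ (by omega : i ≠ 0),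
          Int.ediv_eq_zero_of_lt (by omega) (by omega)]
      omega
    have hr : (n - 1) % i = n % i - 1 := by
      have h2 := Int.ediv_add_emod (n - 1) i
      rw [hq] at h2; omega
    rw [hq, hr, termAB_diff1]
  · -- n % i = 0: quotient drops by one, remainder becomes i - 1
    have hane : 1 ≤ n / i := by
      have := Int.ediv_le_ediv hi0 (show i ≤ n by omega)
      rw [Int.ediv_self (by omega : i ≠ 0)] at this
      omega
    have hq : (n - 1) / i = n / i - 1 := by
      have h2 : n - 1 = (i - 1) + (n / i - 1) * i := by linarith [hab]
      rw [h2, Int.add_mul_ediv_right _ _ (by omega : i ≠ 0),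
          Int.ediv_eq_zero_of_lt (by omega) (by omega)]
      omega
    have hr : (n - 1) % i = i - 1 := by
      have h2 := Int.ediv_add_emod (n - 1) i
      rw [hq] at h2
      have h3 : i * (n / i - 1) = i * (n / i) - i := by ring
      omega
    rw [hq, hr, show n % i = 0 by omega, termAB_diff0 _ _ hane]

-- Branch lemmas for G.
lemma G_pos {n i : Int} (h : 1 ≤ i ∧ i ≤ n) : G n i = term n i + G n (i * 10) := by
  rw [G]; simp [h]

lemma G_neg {n i : Int} (h : ¬ (1 ≤ i ∧ i ≤ n)) : G n i = 0 := by
  rw [G]; simp [h]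

lemma onesS_one : onesS 1 = 1 := by
  rw [onesS_pos (by omega)]
  norm_num [onesS_nonpos]

lemma onesS_ediv_nonpos {n i : Int} (hi : 0 < i) (h : n < i) : onesS (n / i) = 0 := by
  by_cases hn : 0 ≤ n
  · rw [Int.ediv_eq_zero_of_lt hn h, onesS_nonpos (by omega)]
  · refine onesS_nonpos ?_
    have := Int.ediv_le_ediv hi (show n ≤ 0 by omega)
    simpa using this

-- Stepping n down by one removes exactly the 1-digits of n at places ≥ i.
lemma G_step : ∀ k : Nat, ∀ n i : Int, (n + 1 - i).toNat ≤ k → 1 ≤ i →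
    G n i = G (n - 1) i + onesS (n / i) := by
  intro k
  induction k with
  | zero =>
    intro n i hk hi
    rw [G_neg (by omega), G_neg (by omega), onesS_ediv_nonpos (by omega) (by omega)]
    omega
  | succ k ih =>
    intro n i hk hi
    by_cases h : i ≤ n
    · have hi0 : (0:Int) < i := by omega
      have hrec : G n (i * 10) = G (n - 1) (i * 10) + onesS (n / (i * 10)) :=
        ih n (i * 10) (by omega) (by omega)
      have hdiv : n / i / 10 = n / (i * 10) := Int.ediv_ediv_eq_ediv_mul (by omega)
      have hq1 : 1 ≤ n / i := by
        have := Int.ediv_le_ediv hi0 h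
        rw [Int.ediv_self (by omega : i ≠ 0)] at this
        omega
      have hones : onesS (n / i) = (if n / i % 10 = 1 then 1 else 0) + onesS (n / (i * 10)) := by
        rw [onesS_pos (by omega), hdiv]
      by_cases h' : i ≤ n - 1
      · rw [G_pos ⟨hi, h⟩, G_pos ⟨hi, h'⟩, hrec, term_diff hi h', hones]
        ring
      · -- i = n: the place i = n contributes the single number n = 1·i itself
        have hself : n / i = 1 := by
          rw [show i = n by omega]; exact Int.ediv_self (by omega)
        have hmod : n % i = 0 := by
          rw [show i = n by omega]; exact Int.emod_self
        rw [G_pos ⟨hi, h⟩, G_neg (show ¬ (1 ≤ i ∧ i ≤ n - 1) by omega),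
            G_neg (show ¬ (1 ≤ i * 10 ∧ i * 10 ≤ n) by omega), hself, onesS_one,
            term_eq, hself, hmod]
        norm_num [termAB]
    · rw [G_neg (by omega), G_neg (by omega), onesS_ediv_nonpos (by omega) (by omega)]
      omega

lemma S_nonpos {n : Int} (h : n ≤ 0) : S n = 0 := by
  unfold S
  rw [show n.toNat = 0 by omega]
  rfl

lemma S_step {n : Int} (hn : 0 ≤ n) : S n = S (n - 1) + onesS n := by
  rcases (show n = 0 ∨ 1 ≤ n by omega) with h0 | h1
  · rw [h0, S_nonpos (by omega), S_nonpos (by omega), onesS_nonpos (by omega)]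
    omega
  · unfold S
    have : n.toNat = (n - 1).toNat + 1 := by omega
    rw [this, Sn]
    have : ((n - 1).toNat : Int) + 1 = n := by omega
    rw [this]

-- A's value is the running total S.
lemma A_eq_S : ∀ k : Nat, ∀ n : Int, n.toNat = k → G n 1 = S n := by
  intro k
  induction k with
  | zero =>
    intro n hk
    rw [G_neg (by omega), S_nonpos (by omega)]
  | succ k ih =>
    intro n hk
    have h1 : 1 ≤ n := by omega
    rw [G_step (n).toNat n 1 (by omega) (by omega), Int.ediv_one,
        ih (n - 1) (by omega), show S n = S (n - 1) + onesS n from S_step (by omega)]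

-- The decomposition identity behind B: S n = n/10 + [n%10 ≥ 1] + 10·S(n/10 − 1) + (n%10 + 1)·onesS(n/10).
lemma S_decomp : ∀ k : Nat, ∀ n : Int, n.toNat = k → 0 ≤ n →
    S n = n / 10 + (if 1 ≤ n % 10 then 1 else 0) + 10 * S (n / 10 - 1)
          + (n % 10 + 1) * onesS (n / 10) := by
  intro k
  induction k with
  | zero =>
    intro n hk hn0
    have h0 : n = 0 := by omega
    subst h0
    norm_num [S_nonpos, onesS_nonpos]
  | succ k ih =>
    intro n hk hn0
    have h1 : 1 ≤ n := by omega
    have hih := ih (n - 1) (by omega) (by omega)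
    have hstep : S n = S (n - 1) + onesS n := S_step (by omega)
    have honesn : onesS n = (if n % 10 = 1 then 1 else 0) + onesS (n / 10) :=
      onesS_pos (by omega)
    by_cases hd : 1 ≤ n % 10
    · have e1 : (n - 1) / 10 = n / 10 := by omega
      have e2 : (n - 1) % 10 = n % 10 - 1 := by omega
      rw [hstep, hih, e1, e2, honesn]
      split_ifs <;> (try omega) <;> ring
    · -- last digit 0: the previous number ends in 9 and has quotient n/10 − 1
      have hd0 : n % 10 = 0 := by omega
      have hm1 : 1 ≤ n / 10 := by omega
      have e1 : (n - 1) / 10 = n / 10 - 1 := by omega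
      have e2 : (n - 1) % 10 = 9 := by omega
      have hSm : S (n / 10 - 1) = S (n / 10 - 1 - 1) + onesS (n / 10 - 1) :=
        S_step (by omega)
      rw [hstep, hih, e1, e2, honesn, hSm]
      rw [hd0]
      norm_num
      ring
-- B's value is the running total S.
lemma B_eq_S : ∀ k : Nat, ∀ n : Int, n.toNat ≤ k → count_alt n = S n := by
  intro k
  induction k with
  | zero =>
    intro n hk
    rw [count_alt]
    simp only [show n ≤ 0 by omega, dif_pos]
    rw [S_nonpos (by omega)]
  | succ k ih =>
    intro n hk
    by_cases hn : n ≤ 0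
    · rw [count_alt]
      simp only [hn, dif_pos]
      rw [S_nonpos hn]
    · rw [count_alt]
      simp only [hn, dif_neg, not_false_iff]
      rw [PySem.Int.floordiv_eq_ediv_of_pos (by omega : (0:Int) < 10),
          PySem.Int.mod_eq_emod_of_pos (by omega : (0:Int) < 10),
          onesLoop_eq, ih (n / 10 - 1) (by omega),
          S_decomp n.toNat n rfl (by omega)]
      ring

-- ===== VERDICT (by name: the statement is the Claim_ definition above) =====
theorem count_spec : Claim_equal_count := by
  intro n _
  unfold Spec_count count
  rw [countLoop_eq, A_eq_S n.toNat n rfl, B_eq_S n.toNat n (le_refl _)]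
  ring
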